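-- pv_equiv track=rewrite | github.com/diegorandolp/2025-1 | Competitiva/s5_c.py | solve
-- ===== SOURCE A (Python) =====
-- def solve(n, nums, k):
--     cost = [0] * n
--     last_idx = [-1] * n
--     for i in range(1, n):
--         min_idx = i-1
--         min_cost = cost[i-1] + abs(nums[i] - nums[i-1])
--         for j in range(1, k + 1):
--             if i-j >= 0:
--                 new_cost = cost[i-j] + abs(nums[i] - nums[i-j])
--                 if new_cost < min_cost:
--                     min_cost = new_cost
--                     min_idx = j
--         last_idx = min_idx
--         cost[i] = min_cost
--     return cost[n-1]
-- ===== SOURCE B (Python) =====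
-- def solve(n, nums, k):
--     # Dijkstra on the jump graph: vertices 0..n-1, edges j -> t for
--     # 0 < t-j <= max(k,1) with weight |nums[t]-nums[j]| (the adjacent step is
--     # always allowed, as in the original).  Weights are nonnegative, so
--     # settling the unsettled vertex of minimum tentative distance and relaxing
--     # its successors yields the shortest 0 -> n-1 distance.
--     steps = max(k, 1)
--     dist = [None] * n
--     dist[0] = 0
--     settled = [False] * n
--     for _ in range(n):
--         u = -1
--         for v in range(n):
--             if not settled[v] and dist[v] is not None and (u == -1 or dist[v] < dist[u]):
--                 u = v
--         settled[u] = True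
--         for t in range(u + 1, min(u + steps, n - 1) + 1):
--             c = dist[u] + abs(nums[t] - nums[u])
--             if dist[t] is None or c < dist[t]:
--                 dist[t] = c
--     return dist[n - 1]
-- ===== Notes on version B (the rewrite author's own statement) =====
-- stated objective: alternative
-- what changed: A fills a DP table in index order, scanning the up-to-k predecessors of each position; B runs Dijkstra's algorithm on the jump graph instead: it repeatedly settles the unsettled vertex of minimum tentative distance (in distance order, not index order) and relaxes its up-to-k successors, correct because all edge weights |nums[t]-nums[j]| are nonnegative.
import Mathlib
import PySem

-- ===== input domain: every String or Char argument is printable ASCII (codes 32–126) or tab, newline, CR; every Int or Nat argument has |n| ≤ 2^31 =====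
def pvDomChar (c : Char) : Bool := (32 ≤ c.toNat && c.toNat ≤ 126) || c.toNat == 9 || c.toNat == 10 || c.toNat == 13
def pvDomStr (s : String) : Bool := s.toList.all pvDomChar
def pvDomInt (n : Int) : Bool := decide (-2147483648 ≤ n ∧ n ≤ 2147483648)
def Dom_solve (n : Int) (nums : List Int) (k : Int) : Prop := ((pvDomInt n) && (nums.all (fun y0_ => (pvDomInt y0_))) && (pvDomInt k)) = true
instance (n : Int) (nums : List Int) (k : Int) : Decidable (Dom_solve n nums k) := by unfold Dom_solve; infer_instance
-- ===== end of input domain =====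

-- B replaces A's index-order DP over the up-to-k predecessors by Dijkstra's
-- algorithm on the jump graph (settle the unsettled vertex of minimum
-- tentative distance, relax its up-to-k successors); objective: alternative
-- algorithm, same return value.

-- ===== PORT A =====
-- A's inner loop: running min over offsets j = 1..k (guarded i-j >= 0),
-- seeded with the adjacent-step candidate.  pyGetD is exact here: Pre_solve
-- keeps every index A dereferences in range.  (A's variables min_idx/last_idx
-- are written but never read; they do not influence the result.)
def solveInner (nums cost : List Int) (k i : Int) : Int :=
  (PySem.List.pyRange 1 (k + 1) 1).foldl
    (fun mc j =>
      if 0 ≤ i - j then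
        let newCost := PySem.List.pyGetD cost (i - j) 0 +
          |PySem.List.pyGetD nums i 0 - PySem.List.pyGetD nums (i - j) 0|
        if newCost < mc then newCost else mc
      else mc)
    (PySem.List.pyGetD cost (i - 1) 0 +
      |PySem.List.pyGetD nums i 0 - PySem.List.pyGetD nums (i - 1) 0|)

def solve (n : Int) (nums : List Int) (k : Int) : Int :=
  PySem.List.pyGetD
    ((PySem.List.pyRange 1 n 1).foldl                 -- for i in range(1, n)
      (fun cost i => PySem.List.pySetD cost i (solveInner nums cost k i))
      (List.replicate n.toNat 0))                     -- cost = [0] * n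
    (n - 1) 0                                         -- return cost[n-1]

-- ===== PORT B =====
-- Python's 'dist[v] < dist[u]' from the argmin scan: whenever it is evaluated
-- both sides are ints (u == -1 was tested first and u is only ever set to a v
-- with dist[v] not None); exact there.
def optLt : Option Int → Option Int → Bool
  | some x, some y => decide (x < y)
  | _, _ => false

-- 'u = -1; for v in range(n): if not settled[v] and dist[v] is not None and (u == -1 or dist[v] < dist[u]): u = v'
def argminScan (dist : List (Option Int)) (settled : List Bool) (n : Int) : Int :=
  (PySem.List.pyRange 0 n 1).foldl
    (fun u v =>
      if PySem.List.pyGetD settled v false = false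
          ∧ PySem.List.pyGetD dist v none ≠ none
          ∧ (u = -1 ∨ optLt (PySem.List.pyGetD dist v none) (PySem.List.pyGetD dist u none) = true)
      then v else u) (-1)

-- 'c = dist[u] + abs(nums[t] - nums[u]); if dist[t] is None or c < dist[t]: dist[t] = c'
-- (dist[u] is an int whenever this runs: u was chosen with dist[u] not None)
def relaxB (nums : List Int) (u : Int) (dist : List (Option Int)) (t : Int) : List (Option Int) :=
  let c := (PySem.List.pyGetD dist u none).getD 0 +
    |PySem.List.pyGetD nums t 0 - PySem.List.pyGetD nums u 0|
  match PySem.List.pyGetD dist t none with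
  | none => PySem.List.pySetD dist t (some c)
  | some d => if c < d then PySem.List.pySetD dist t (some c) else dist

-- one round: pick u, settle it, relax its successors u+1 .. min(u+steps, n-1)
def dijkstraStep (nums : List Int) (n steps : Int)
    (st : List (Option Int) × List Bool) : List (Option Int) × List Bool :=
  let u := argminScan st.1 st.2 n
  let settled' := PySem.List.pySetD st.2 u true
  let dist' := (PySem.List.pyRange (u + 1) (min (u + steps) (n - 1) + 1) 1).foldl
    (relaxB nums u) st.1
  (dist', settled')

def solve_alt (n : Int) (nums : List Int) (k : Int) : Int :=
  let final := (PySem.List.pyRange 0 n 1).foldl      -- for _ in range(n)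
    (fun st _ => dijkstraStep nums n (max k 1) st)
    (PySem.List.pySetD (List.replicate n.toNat none) 0 (some 0),   -- dist = [None]*n; dist[0] = 0
     List.replicate n.toNat false)                                 -- settled = [False]*n
  (PySem.List.pyGetD final.1 (n - 1) none).getD 0    -- return dist[n-1]

-- ===== PRECONDITION & SPEC =====
-- Exactly where Python A returns: n ≥ 1 (n ≤ 0 ⇒ cost[n-1] IndexError) and all
-- accessed indices 1..n-1 inside nums (n > len(nums) ⇒ nums[i] IndexError),
-- except that n = 1 touches nums not at all.
def Pre_solve (n : Int) (nums : List Int) (k : Int) : Prop :=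
  1 ≤ n ∧ (n = 1 ∨ n ≤ (nums.length : Int))
instance (n : Int) (nums : List Int) (k : Int) : Decidable (Pre_solve n nums k) := by
  unfold Pre_solve; infer_instance

def pvWitness_solve : Int × List Int × Int := (4, [10, 30, 40, 20], 2)

def Spec_solve (n : Int) (nums : List Int) (k : Int) (out : Int) : Prop := out = solve_alt n nums k
instance (n : Int) (nums : List Int) (k : Int) (out : Int) : Decidable (Spec_solve n nums k out) := by unfold Spec_solve; infer_instance

-- ===== CLAIM (what is proved, stated in full; the proofs are below) =====
def Claim_equal_solve : Prop := ∀ (n : Int) (nums : List Int) (k : Int), Dom_solve n nums k → Pre_solve n nums k → Spec_solve n nums k (solve n nums k)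

-- ===== LEMMAS AND PROOFS =====

-- the minimum of a nonempty list of Ints (0 on [], never used there)
def listMin : List Int → Int
  | [] => 0
  | x :: l => l.foldl min x

-- window of predecessor indices of t: t-K, …, t-1 (clipped at 0); K ≥ 1
def win (K t : ℕ) : List ℕ := List.range' (t - K) (min K t)

-- reference DP table d 0 … d m, built left to right
def dTab (a : ℕ → Int) (K : ℕ) : ℕ → List Int
  | 0 => [0]
  | m + 1 =>
    let p := dTab a K m
    p ++ [listMin ((win K (m + 1)).map (fun j => p.getD j 0 + |a (m + 1) - a j|))]

def dRef (a : ℕ → Int) (K : ℕ) (t : ℕ) : Int := (dTab a K t).getD t 0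

theorem length_dTab (a : ℕ → Int) (K m : ℕ) : (dTab a K m).length = m + 1 := by
  induction m with
  | zero => rfl
  | succ m ih => simp [dTab, ih]

theorem dTab_getD (a : ℕ → Int) (K : ℕ) {j m : ℕ} (h : j ≤ m) :
    (dTab a K m).getD j 0 = dRef a K j := by
  induction m with
  | zero => have : j = 0 := by omega
            subst this; rfl
  | succ m ih =>
    rcases Nat.lt_or_ge j (m + 1) with hj | hj
    · show ((dTab a K m) ++ _).getD j 0 = _
      rw [List.getD_append _ _ _ _ (by rw [length_dTab]; omega)]
      exact ih (by omega)
    · have : j = m + 1 := by omega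
      subst this; rfl

theorem mem_win {K t j : ℕ} (h : j ∈ win K t) : j < t := by
  unfold win at h
  rw [List.mem_range'] at h
  omega

theorem dRef_succ (a : ℕ → Int) (K m : ℕ) :
    dRef a K (m + 1) =
      listMin ((win K (m + 1)).map (fun j => dRef a K j + |a (m + 1) - a j|)) := by
  show ((dTab a K m) ++ _).getD (m + 1) 0 = _
  rw [List.getD_append_right _ _ _ _ (by rw [length_dTab]), length_dTab]
  simp only [Nat.sub_self]
  have : ∀ j ∈ win K (m + 1),
      (dTab a K m).getD j 0 + |a (m + 1) - a j| = dRef a K j + |a (m + 1) - a j| := by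
    intro j hj
    rw [dTab_getD a K (by have := mem_win hj; omega)]
  rw [List.map_congr_left this]
  rfl

theorem if_lt_eq_min (x y : Int) : (if x < y then x else y) = min y x := by
  rw [min_def]; split_ifs <;> omega

theorem foldl_min_init (l : List Int) (x y : Int) :
    l.foldl min (min x y) = min x (l.foldl min y) := by
  induction l generalizing y with
  | nil => rfl
  | cons z l ih => simp only [List.foldl_cons, min_assoc, ih]

theorem listMin_cons (x : Int) (l : List Int) (h : l ≠ []) :
    listMin (x :: l) = min x (listMin l) := by
  obtain ⟨y, l, rfl⟩ := List.exists_cons_of_ne_nil h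
  simp only [listMin, List.foldl_cons]
  rw [← foldl_min_init]

theorem cast_sub_getD (xs : List Int) (i j : ℕ) (h : j ≤ i) :
    PySem.List.pyGetD xs ((i : Int) - (j : Int)) 0 = xs.getD (i - j) 0 := by
  have hc : ((i : Int) - (j : Int)) = ((i - j : ℕ) : Int) := by omega
  rw [hc, PySem.List.pyGetD_natCast]

theorem win_nonempty {K t : ℕ} (hK : 1 ≤ K) (ht : 1 ≤ t) : win K t ≠ [] := by
  unfold win
  simp only [ne_eq, List.range'_eq_nil_iff]
  omega

theorem mem_win_iff {K t j : ℕ} : j ∈ win K t ↔ t - K ≤ j ∧ j < t := by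
  unfold win
  rw [List.mem_range'_1]
  omega

theorem innerFoldAux (nums cost : List Int) (i m : ℕ) (hi : 1 ≤ i) (hm : 1 ≤ m) :
    (PySem.List.pyRange 1 ((m : Int) + 1) 1).foldl
      (fun mc j =>
        if 0 ≤ (i : Int) - j then
          let newCost := PySem.List.pyGetD cost ((i : Int) - j) 0 +
            |PySem.List.pyGetD nums (i : Int) 0 - PySem.List.pyGetD nums ((i : Int) - j) 0|
          if newCost < mc then newCost else mc
        else mc)
      (cost.getD (i - 1) 0 + |nums.getD i 0 - nums.getD (i - 1) 0|)
    = listMin ((win m i).map (fun j => cost.getD j 0 + |nums.getD i 0 - nums.getD j 0|)) := by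
  induction m with
  | zero => omega
  | succ m ih =>
    rcases Nat.eq_or_lt_of_le hm with hm1 | hm2
    · -- m + 1 = 1 : single offset j = 1
      have hm0 : m = 0 := by omega
      subst hm0
      have hr : PySem.List.pyRange 1 (((1 : ℕ) : Int) + 1) 1 = [1] := by
        simpa using PySem.List.pyRange_one_singleton 1
      rw [hr]
      simp only [List.foldl_cons, List.foldl_nil]
      rw [if_pos (by omega : (0 : Int) ≤ (i : Int) - 1)]
      have h1 : PySem.List.pyGetD cost ((i : Int) - 1) 0 = cost.getD (i - 1) 0 := by
        simpa using cast_sub_getD cost i 1 hi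
      have h2 : PySem.List.pyGetD nums ((i : Int) - 1) 0 = nums.getD (i - 1) 0 := by
        simpa using cast_sub_getD nums i 1 hi
      have h3 : PySem.List.pyGetD nums ((i : Int)) 0 = nums.getD i 0 := by
        simp
      simp only [h1, h2, h3, lt_irrefl, if_false]
      have hw : win 1 i = [i - 1] := by
        unfold win
        rw [min_eq_left hi]
        rfl
      rw [hw]
      rfl
    · -- m ≥ 1, peel offset m+1 off the right
      have hm' : 1 ≤ m := by omega
      have hsplit : PySem.List.pyRange 1 (((m + 1 : ℕ) : Int) + 1) 1
          = PySem.List.pyRange 1 ((m : Int) + 1) 1 ++ [((m : Int) + 1)] := by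
        have := PySem.List.pyRange_one_succ_right (a := 1) (b := (m : Int) + 1) (by omega)
        push_cast
        convert this using 2
      rw [hsplit, List.foldl_append, ih hm']
      simp only [List.foldl_cons, List.foldl_nil]
      by_cases hcase : m + 1 ≤ i
      · rw [if_pos (by omega : (0 : Int) ≤ (i : Int) - ((m : Int) + 1))]
        have hc1 : PySem.List.pyGetD cost ((i : Int) - ((m : Int) + 1)) 0
            = cost.getD (i - (m + 1)) 0 := by
          have := cast_sub_getD cost i (m + 1) hcase
          simpa using this
        have hc2 : PySem.List.pyGetD nums ((i : Int) - ((m : Int) + 1)) 0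
            = nums.getD (i - (m + 1)) 0 := by
          have := cast_sub_getD nums i (m + 1) hcase
          simpa using this
        have h3 : PySem.List.pyGetD nums ((i : Int)) 0 = nums.getD i 0 := by
          simp
        simp only [hc1, hc2, h3]
        have hwin : win (m + 1) i
            = (i - (m + 1)) :: win m i := by
          unfold win
          rw [min_eq_left hcase, min_eq_left (by omega : m ≤ i)]
          have : List.range' (i - (m + 1)) (m + 1) = (i - (m + 1)) :: List.range' (i - (m + 1) + 1) m :=
            List.range'_succ
          rw [this]
          have harg : i - (m + 1) + 1 = i - m := by omega
          rw [harg]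
        rw [hwin, List.map_cons,
          listMin_cons _ _ (by
            simp only [ne_eq, List.map_eq_nil_iff]
            exact win_nonempty hm' hi),
          if_lt_eq_min, min_comm]
      · rw [if_neg (by omega : ¬ (0 : Int) ≤ (i : Int) - ((m : Int) + 1))]
        have : win (m + 1) i = win m i := by
          unfold win
          have h1 : i - (m + 1) = 0 := by omega
          have h2 : i - m = 0 := by omega
          rw [h1, h2]
          congr 1
          omega
        rw [this]

-- A's inner loop computes the window minimum (reads only via getD, so exact as stated)
theorem inner_eq (nums cost : List Int) (k : Int) (i : ℕ) (hi : 1 ≤ i) :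
    solveInner nums cost k i =
      listMin ((win (max k 1).toNat i).map
        (fun j => cost.getD j 0 + |nums.getD i 0 - nums.getD j 0|)) := by
  unfold solveInner
  have h1 : PySem.List.pyGetD cost ((i : Int) - 1) 0 = cost.getD (i - 1) 0 := by
    simpa using cast_sub_getD cost i 1 hi
  have h2 : PySem.List.pyGetD nums ((i : Int) - 1) 0 = nums.getD (i - 1) 0 := by
    simpa using cast_sub_getD nums i 1 hi
  have h3 : PySem.List.pyGetD nums ((i : Int)) 0 = nums.getD i 0 := by
    simp
  rw [h1, h2, h3]
  by_cases hk : k ≤ 0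
  · -- range(1, k+1) is empty; window collapses to the single offset 1
    rw [PySem.List.pyRange_one_eq_nil (by omega)]
    have hK : (max k 1).toNat = 1 := by omega
    rw [hK]
    have hw : win 1 i = [i - 1] := by
      unfold win
      rw [min_eq_left hi]
      rfl
    rw [hw]
    rfl
  · have hk1 : 1 ≤ k := by omega
    have hK : ((max k 1).toNat : Int) = k := by omega
    have hm1 : 1 ≤ (max k 1).toNat := by omega
    have := innerFoldAux nums cost i (max k 1).toNat hi hm1
    rw [hK] at this
    rw [h3] at this
    exact this

-- ---------- A's outer loop builds the reference table ----------

theorem set_append_length {α : Type} (l1 l2 : List α) (v : α) :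
    (l1 ++ l2).set l1.length v = l1 ++ l2.set 0 v := by
  induction l1 with
  | nil => rfl
  | cons x t ih => simp [ih]

theorem set_append_length' {α : Type} (l1 l2 : List α) (v : α) (m : ℕ)
    (h : m = l1.length) : (l1 ++ l2).set m v = l1 ++ l2.set 0 v := by
  rw [h, set_append_length]

theorem A_loop (nums : List Int) (k n : Int) (hn : 1 ≤ n) (m : ℕ)
    (hm : m ≤ n.toNat - 1) :
    (PySem.List.pyRange 1 ((m : Int) + 1) 1).foldl
      (fun cost i => PySem.List.pySetD cost i (solveInner nums cost k i))
      (List.replicate n.toNat 0)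
    = dTab (fun t => nums.getD t 0) (max k 1).toNat m
        ++ List.replicate (n.toNat - 1 - m) 0 := by
  induction m with
  | zero =>
    rw [PySem.List.pyRange_one_eq_nil (by omega)]
    show List.replicate n.toNat 0 = [0] ++ List.replicate (n.toNat - 1) 0
    have : n.toNat = (n.toNat - 1) + 1 := by omega
    rw [this, List.replicate_succ]
    rfl
  | succ m ih =>
    have hsplit : PySem.List.pyRange 1 (((m + 1 : ℕ) : Int) + 1) 1
        = PySem.List.pyRange 1 ((m : Int) + 1) 1 ++ [((m + 1 : ℕ) : Int)] := by
      have := PySem.List.pyRange_one_succ_right (a := 1) (b := (m : Int) + 1) (by omega)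
      push_cast
      convert this using 2
    rw [hsplit, List.foldl_append, ih (by omega)]
    simp only [List.foldl_cons, List.foldl_nil]
    set a : ℕ → Int := fun t => nums.getD t 0 with ha
    set K : ℕ := (max k 1).toNat with hK
    set p := dTab a K m ++ List.replicate (n.toNat - 1 - m) 0 with hp
    rw [PySem.List.pySetD_natCast]
    have hv : solveInner nums p k (((m + 1 : ℕ) : Int))
        = listMin ((win K (m + 1)).map (fun j => (dTab a K m).getD j 0 + |a (m + 1) - a j|)) := by
      rw [inner_eq nums p k (m + 1) (by omega)]
      congr 1
      apply List.map_congr_left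
      intro j hj
      have hjm : j < m + 1 := mem_win hj
      rw [hp, List.getD_append _ _ _ _ (by rw [length_dTab]; omega)]
    rw [hv, hp]
    rw [set_append_length' _ _ _ _ (by rw [length_dTab])]
    have hrep : List.replicate (n.toNat - 1 - m) (0 : Int)
        = 0 :: List.replicate (n.toNat - 1 - (m + 1)) 0 := by
      have : n.toNat - 1 - m = (n.toNat - 1 - (m + 1)) + 1 := by omega
      rw [this, List.replicate_succ]
    rw [hrep]
    show dTab a K m ++ _ :: _ = dTab a K (m + 1) ++ _
    rw [show dTab a K (m + 1) = dTab a K m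
          ++ [listMin ((win K (m + 1)).map fun j => (dTab a K m).getD j 0 + |a (m + 1) - a j|)] from rfl]
    simp

theorem solve_eq_dRef (n : Int) (nums : List Int) (k : Int) (hn : 1 ≤ n) :
    solve n nums k = dRef (fun t => nums.getD t 0) (max k 1).toNat (n.toNat - 1) := by
  unfold solve
  have hrange : PySem.List.pyRange 1 n = PySem.List.pyRange 1 (((n.toNat - 1 : ℕ) : Int) + 1) := by
    congr 1
    omega
  rw [hrange, A_loop nums k n (by omega) (n.toNat - 1) (by omega)]
  rw [Nat.sub_self, List.replicate_zero, List.append_nil]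
  have hidx : n - 1 = ((n.toNat - 1 : ℕ) : Int) := by omega
  rw [hidx, PySem.List.pyGetD_natCast]
  rfl

-- ---------- B: Dijkstra reaches the same shortest-path values ----------

theorem listMin_mem (l : List Int) (h : l ≠ []) : listMin l ∈ l := by
  obtain ⟨x, t, rfl⟩ := List.exists_cons_of_ne_nil h
  show t.foldl min x ∈ x :: t
  rcases PySem.List.foldl_min_mem t x with h1 | h1
  · rw [h1]; exact List.mem_cons_self
  · exact List.mem_cons_of_mem _ h1

theorem listMin_le (l : List Int) (x : Int) (h : x ∈ l) : listMin l ≤ x := by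
  obtain ⟨y, t, rfl⟩ := List.exists_cons_of_ne_nil (List.ne_nil_of_mem h)
  show t.foldl min y ≤ x
  rcases List.mem_cons.mp h with rfl | hx
  · exact (PySem.List.foldl_min_le t x).1
  · exact (PySem.List.foldl_min_le t y).2 x hx

theorem dRef_le (a : ℕ → Int) (K : ℕ) {v j : ℕ} (h : j ∈ win K v) :
    dRef a K v ≤ dRef a K j + |a v - a j| := by
  have hv : 1 ≤ v := by have := mem_win h; omega
  obtain ⟨m, rfl⟩ : ∃ m, v = m + 1 := ⟨v - 1, by omega⟩
  rw [dRef_succ]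
  exact listMin_le _ _ (List.mem_map.mpr ⟨j, h, rfl⟩)

theorem dRef_argmin (a : ℕ → Int) (K : ℕ) {v : ℕ} (hK : 1 ≤ K) (hv : 1 ≤ v) :
    ∃ j ∈ win K v, dRef a K v = dRef a K j + |a v - a j| := by
  obtain ⟨m, rfl⟩ : ∃ m, v = m + 1 := ⟨v - 1, by omega⟩
  have hmem := listMin_mem ((win K (m + 1)).map (fun j => dRef a K j + |a (m + 1) - a j|))
    (by simp only [ne_eq, List.map_eq_nil_iff]; exact win_nonempty hK hv)
  rw [← dRef_succ] at hmem
  obtain ⟨j, hj, he⟩ := List.mem_map.mp hmem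
  exact ⟨j, hj, he.symm⟩

theorem dRef_zero (a : ℕ → Int) (K : ℕ) : dRef a K 0 = 0 := rfl

-- merge of one relaxation candidate into an optional tentative distance
def dmerge (o : Option Int) (c : Int) : Option Int :=
  match o with
  | none => some c
  | some d => if c < d then some c else some d

-- the Dijkstra loop invariant after r settled rounds
def DInv (a : ℕ → Int) (K N r : ℕ) (dist : List (Option Int)) (settled : List Bool) : Prop :=
  dist.length = N ∧ settled.length = N ∧ settled.count true = r ∧
  (∀ s, s < N → settled.getD s false = true → dist.getD s none = some (dRef a K s)) ∧
  (∀ v, v < N → settled.getD v false = false →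
    (v = 0 → dist.getD 0 none = some 0) ∧
    (v ≠ 0 →
      (dist.getD v none = none → ∀ j ∈ win K v, settled.getD j false = false) ∧
      (∀ d, dist.getD v none = some d →
        (∀ j ∈ win K v, settled.getD j false = true → d ≤ dRef a K j + |a v - a j|) ∧
        (∃ j ∈ win K v, settled.getD j false = true ∧ d = dRef a K j + |a v - a j|))))

theorem exists_unsettled (settled : List Bool) (r : ℕ) (hc : settled.count true = r)
    (hr : r < settled.length) : ∃ v < settled.length, settled.getD v false = false := by
  by_contra hcon
  push_neg at hcon
  have hall : ∀ b ∈ settled, true = b := by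
    intro b hb
    obtain ⟨i, hi, hbe⟩ := List.mem_iff_getElem.mp hb
    have h2 := hcon i hi
    rw [List.getD_eq_getElem _ _ hi] at h2
    rw [← hbe]
    revert h2
    cases settled[i] <;> simp
  have := List.count_eq_length.mpr hall
  omega

theorem all_settled (settled : List Bool) (hc : settled.count true = settled.length) :
    ∀ v < settled.length, settled.getD v false = true := by
  intro v hv
  have hall := List.count_eq_length.mp hc
  rw [List.getD_eq_getElem _ _ hv]
  exact (hall settled[v] (List.getElem_mem hv)).symm

theorem count_set_true (settled : List Bool) (u : ℕ) (hu : u < settled.length)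
    (hf : settled.getD u false = false) :
    (settled.set u true).count true = settled.count true + 1 := by
  induction settled generalizing u with
  | nil => simp at hu
  | cons b t ih =>
    cases u with
    | zero =>
      have : b = false := by simpa using hf
      subst this
      simp
    | succ u =>
      have hf' : t.getD u false = false := by simpa using hf
      simp only [List.set_cons_succ, List.count_cons]
      rw [ih u (by simpa using hu) hf']
      split_ifs <;> omega

-- any unsettled vertex v has an unsettled vertex y whose tentative distance is ≤ δ v
theorem lemL (a : ℕ → Int) (K N r : ℕ) (dist : List (Option Int)) (settled : List Bool)
    (hK : 1 ≤ K) (hinv : DInv a K N r dist settled) :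
    ∀ v, v < N → settled.getD v false = false →
      ∃ y, y < N ∧ settled.getD y false = false ∧
        ∃ e, dist.getD y none = some e ∧ e ≤ dRef a K v := by
  intro v
  induction v using Nat.strong_induction_on with
  | _ v ih =>
    intro hv hunset
    obtain ⟨hlen, hslen, hcount, hI1, hI2⟩ := hinv
    by_cases hv0 : v = 0
    · subst hv0
      exact ⟨0, hv, hunset, 0, (hI2 0 hv hunset).1 rfl, le_of_eq (dRef_zero a K).symm⟩
    · obtain ⟨j, hj, hje⟩ := dRef_argmin a K (v := v) hK (by omega)
      have hjv : j < v := mem_win hj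
      have hjN : j < N := by omega
      by_cases hsj : settled.getD j false = true
      · -- the argmin predecessor is settled: v's own tentative distance works
        cases hdv : dist.getD v none with
        | none =>
          have := ((hI2 v hv hunset).2 hv0).1 hdv j hj
          rw [hsj] at this
          cases this
        | some d =>
          have hbound := (((hI2 v hv hunset).2 hv0).2 d hdv).1 j hj hsj
          exact ⟨v, hv, hunset, d, hdv, by omega⟩
      · have hsj' : settled.getD j false = false := by
          revert hsj; cases settled.getD j false <;> simp
        obtain ⟨y, hy, hyu, e, he, hle⟩ := ih j hjv hjN hsj'
        have habs := abs_nonneg (a v - a j)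
        exact ⟨y, hy, hyu, e, he, by omega⟩

-- tentative distances of unsettled vertices are ≥ the true distance
theorem dist_ge (a : ℕ → Int) (K N r : ℕ) (dist : List (Option Int)) (settled : List Bool)
    (hinv : DInv a K N r dist settled) :
    ∀ v, v < N → settled.getD v false = false →
      ∀ d, dist.getD v none = some d → dRef a K v ≤ d := by
  intro v hv hunset d hd
  obtain ⟨hlen, hslen, hcount, hI1, hI2⟩ := hinv
  by_cases hv0 : v = 0
  · subst hv0
    have h0 := (hI2 0 hv hunset).1 rfl
    rw [h0] at hd
    injection hd with h
    rw [dRef_zero]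
    omega
  · obtain ⟨hbound, j, hj, hsj, hde⟩ := ((hI2 v hv hunset).2 hv0).2 d hd
    have := dRef_le a K hj
    omega

-- the partial argmin scan over [0, m): either no unsettled finite entry yet (result -1),
-- or the result is an unsettled index of minimal finite tentative distance so far
theorem argminScan_aux (dist : List (Option Int)) (settled : List Bool) (m : ℕ) :
    ((∀ v, v < m → settled.getD v false = false → dist.getD v none = none) ∧
      (PySem.List.pyRange 0 ((m : ℕ) : Int) 1).foldl
        (fun u v =>
          if PySem.List.pyGetD settled v false = false
              ∧ PySem.List.pyGetD dist v none ≠ none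
              ∧ (u = -1 ∨ optLt (PySem.List.pyGetD dist v none) (PySem.List.pyGetD dist u none) = true)
          then v else u) (-1) = -1)
    ∨ (∃ u : ℕ, u < m ∧
        (PySem.List.pyRange 0 ((m : ℕ) : Int) 1).foldl
          (fun u v =>
            if PySem.List.pyGetD settled v false = false
                ∧ PySem.List.pyGetD dist v none ≠ none
                ∧ (u = -1 ∨ optLt (PySem.List.pyGetD dist v none) (PySem.List.pyGetD dist u none) = true)
            then v else u) (-1) = ((u : ℕ) : Int) ∧
        settled.getD u false = false ∧
        ∃ du, dist.getD u none = some du ∧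
          ∀ v, v < m → settled.getD v false = false →
            ∀ dv, dist.getD v none = some dv → du ≤ dv) := by
  induction m with
  | zero =>
    left
    refine ⟨by omega, ?_⟩
    rw [show (((0 : ℕ) : Int)) = (0 : Int) from rfl, PySem.List.pyRange_one_eq_nil le_rfl]
    rfl
  | succ m ih =>
    have hsplit : PySem.List.pyRange 0 ((m + 1 : ℕ) : Int) 1
        = PySem.List.pyRange 0 ((m : ℕ) : Int) 1 ++ [((m : ℕ) : Int)] := by
      have h2 : ((m + 1 : ℕ) : Int) = ((m : ℕ) : Int) + 1 := by push_cast; ring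
      rw [h2, PySem.List.pyRange_one_succ_right (Int.natCast_nonneg m)]
    rw [hsplit, List.foldl_append]
    rcases ih with ⟨hnone, hres⟩ | ⟨u, hu, hres, hsu, du, hdu, hmin⟩
    · rw [hres]
      simp only [List.foldl_cons, List.foldl_nil, PySem.List.pyGetD_natCast]
      by_cases hc : settled.getD m false = false ∧ dist.getD m none ≠ none
      · right
        refine ⟨m, by omega, ?_, hc.1, ?_⟩
        · rw [if_pos ⟨hc.1, hc.2, Or.inl (by trivial)⟩]
        · obtain ⟨dm, hdm⟩ := Option.ne_none_iff_exists'.mp hc.2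
          refine ⟨dm, hdm, ?_⟩
          intro v hv hsv dv hdv
          rcases Nat.lt_or_ge v m with h | h
          · rw [hnone v h hsv] at hdv
            cases hdv
          · have : v = m := by omega
            subst this
            rw [hdm] at hdv
            injection hdv with h
            omega
      · left
        refine ⟨?_, ?_⟩
        · intro v hv hsv
          rcases Nat.lt_or_ge v m with h | h
          · exact hnone v h hsv
          · have : v = m := by omega
            subst this
            by_contra hne
            exact hc ⟨hsv, hne⟩
        · rw [if_neg (fun h => hc ⟨h.1, h.2.1⟩)]
    · rw [hres]
      simp only [List.foldl_cons, List.foldl_nil, PySem.List.pyGetD_natCast]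
      have hne1 : ¬ (((u : ℕ) : Int) = -1) := by omega
      by_cases hc : settled.getD m false = false
          ∧ dist.getD m none ≠ none
          ∧ optLt (dist.getD m none) (dist.getD u none) = true
      · -- new strictly better candidate at index m
        obtain ⟨dm, hdm⟩ := Option.ne_none_iff_exists'.mp hc.2.1
        have hlt : dm < du := by
          have := hc.2.2
          rw [hdm, hdu] at this
          simpa [optLt] using this
        right
        refine ⟨m, by omega, ?_, hc.1, dm, hdm, ?_⟩
        · rw [if_pos ⟨hc.1, hc.2.1, Or.inr hc.2.2⟩]
        · intro v hv hsv dv hdv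
          rcases Nat.lt_or_ge v m with h | h
          · have := hmin v h hsv dv hdv
            omega
          · have : v = m := by omega
            subst this
            rw [hdm] at hdv
            injection hdv with h
            omega
      · -- keep u; if m is a candidate its distance is not smaller
        right
        refine ⟨u, by omega, ?_, hsu, du, hdu, ?_⟩
        · rw [if_neg (fun h => hc ⟨h.1, h.2.1, (h.2.2).resolve_left hne1⟩)]
        · intro v hv hsv dv hdv
          rcases Nat.lt_or_ge v m with h | h
          · exact hmin v h hsv dv hdv
          · have : v = m := by omega
            subst this
            have : ¬ optLt (dist.getD v none) (dist.getD u none) = true :=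
              fun ho => hc ⟨hsv, by rw [hdv]; simp, ho⟩
            rw [hdv, hdu] at this
            simp only [optLt, decide_eq_true_eq] at this
            omega

-- the argmin scan returns an unsettled vertex of minimal finite tentative distance
theorem argminScan_spec (dist : List (Option Int)) (settled : List Bool) (n : Int) (N : ℕ)
    (hn : n = (N : Int))
    (H : ∃ v, v < N ∧ settled.getD v false = false ∧ dist.getD v none ≠ none) :
    ∃ u : ℕ, argminScan dist settled n = ((u : ℕ) : Int) ∧ u < N ∧ settled.getD u false = false ∧
      ∃ du, dist.getD u none = some du ∧
        ∀ v, v < N → settled.getD v false = false →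
          ∀ dv, dist.getD v none = some dv → du ≤ dv := by
  obtain ⟨v0, hv0, hsv0, hdv0⟩ := H
  rcases argminScan_aux dist settled N with ⟨hnone, -⟩ | ⟨u, hu, hres, hsu, du, hdu, hmin⟩
  · exact absurd (hnone v0 hv0 hsv0) hdv0
  · refine ⟨u, ?_, hu, hsu, du, hdu, fun v hv => hmin v hv⟩
    unfold argminScan
    rw [hn]
    exact hres

theorem getD_set_any {α : Type} (l : List α) (i j : ℕ) (v d : α) :
    (l.set i v).getD j d = if j = i ∧ j < l.length then v else l.getD j d := by
  rw [List.getD_eq_getElem?_getD, List.getD_eq_getElem?_getD, List.getElem?_set]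
  by_cases h1 : i = j
  · subst h1
    by_cases h2 : i < l.length
    · rw [if_pos rfl, if_pos h2, if_pos ⟨rfl, h2⟩]
      rfl
    · rw [if_pos rfl, if_neg h2, if_neg (fun hh => h2 hh.2),
        List.getElem?_eq_none (by omega)]
  · rw [if_neg h1, if_neg (fun hh => h1 hh.1.symm)]

theorem relaxB_length (nums : List Int) (u t : Int) (dist : List (Option Int)) :
    (relaxB nums u dist t).length = dist.length := by
  simp only [relaxB]
  cases PySem.List.pyGetD dist t none
  · simp [PySem.List.length_pySetD]
  · dsimp only
    split_ifs <;> simp [PySem.List.length_pySetD]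

theorem relax_fold_length (nums : List Int) (u : ℕ) (dist : List (Option Int)) (c : ℕ) :
    ((PySem.List.pyRange ((u : Int) + 1) ((u : Int) + 1 + (c : Int)) 1).foldl
        (relaxB nums u) dist).length = dist.length := by
  induction c with
  | zero =>
    rw [show ((u : Int) + 1 + ((0 : ℕ) : Int)) = (u : Int) + 1 by push_cast; ring,
      PySem.List.pyRange_one_eq_nil le_rfl]
    rfl
  | succ c ih =>
    have hc0 : (0 : Int) ≤ (c : Int) := Int.natCast_nonneg c
    have hsplit : PySem.List.pyRange ((u : Int) + 1) ((u : Int) + 1 + ((c + 1 : ℕ) : Int)) 1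
        = PySem.List.pyRange ((u : Int) + 1) ((u : Int) + 1 + ((c : ℕ) : Int)) 1
            ++ [(u : Int) + 1 + (c : Int)] := by
      have h2 : ((u : Int) + 1 + ((c + 1 : ℕ) : Int)) = ((u : Int) + 1 + ((c : ℕ) : Int)) + 1 := by
        push_cast; ring
      rw [h2, PySem.List.pyRange_one_succ_right (by omega)]
    rw [hsplit, List.foldl_append]
    simp only [List.foldl_cons, List.foldl_nil]
    rw [relaxB_length, ih]


-- effect of the relaxation fold, pointwise
theorem relax_fold (nums : List Int) (u : ℕ) (du : Int) (dist : List (Option Int))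
    (hdu : dist.getD u none = some du) (c : ℕ) :
    ∀ t : ℕ, ((PySem.List.pyRange ((u : Int) + 1) ((u : Int) + 1 + (c : Int)) 1).foldl
        (relaxB nums u) dist).getD t none
      = if u + 1 ≤ t ∧ t ≤ u + c ∧ t < dist.length
        then dmerge (dist.getD t none) (du + |nums.getD t 0 - nums.getD u 0|)
        else dist.getD t none := by
  induction c with
  | zero =>
    intro t
    rw [show ((u : Int) + 1 + ((0 : ℕ) : Int)) = (u : Int) + 1 by push_cast; ring,
      PySem.List.pyRange_one_eq_nil le_rfl]
    rw [if_neg (by omega)]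
    rfl
  | succ c ih =>
    intro t
    have hc0 : (0 : Int) ≤ (c : Int) := Int.natCast_nonneg c
    have hsplit : PySem.List.pyRange ((u : Int) + 1) ((u : Int) + 1 + ((c + 1 : ℕ) : Int)) 1
        = PySem.List.pyRange ((u : Int) + 1) ((u : Int) + 1 + ((c : ℕ) : Int)) 1
            ++ [(u : Int) + 1 + (c : Int)] := by
      have h2 : ((u : Int) + 1 + ((c + 1 : ℕ) : Int)) = ((u : Int) + 1 + ((c : ℕ) : Int)) + 1 := by
        push_cast; ring
      rw [h2, PySem.List.pyRange_one_succ_right (by omega)]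
    rw [hsplit, List.foldl_append]
    simp only [List.foldl_cons, List.foldl_nil]
    set prev := (PySem.List.pyRange ((u : Int) + 1) ((u : Int) + 1 + ((c : ℕ) : Int)) 1).foldl
      (relaxB nums u) dist with hprevdef
    have hlen : prev.length = dist.length := relax_fold_length nums u dist c
    have hcast : (u : Int) + 1 + (c : Int) = ((u + 1 + c : ℕ) : Int) := by push_cast; ring
    have hprev_u : prev.getD u none = some du := by
      rw [ih u, if_neg (by omega)]
      exact hdu
    have hscrut : prev.getD (u + 1 + c) none = dist.getD (u + 1 + c) none := by
      rw [ih (u + 1 + c), if_neg (by omega)]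
    rw [hcast]
    simp only [relaxB, PySem.List.pyGetD_natCast, PySem.List.pySetD_natCast,
      hprev_u, hscrut, Option.getD_some]
    cases hd0 : dist.getD (u + 1 + c) none with
    | none =>
      dsimp only
      rw [getD_set_any, hlen, ih t]
      by_cases ht : t = u + 1 + c ∧ t < dist.length
      · rw [if_pos ht, if_pos (by omega)]
        obtain ⟨ht1, ht2⟩ := ht
        subst ht1
        rw [hd0]
        rfl
      · rw [if_neg ht]
        by_cases h2 : u + 1 ≤ t ∧ t ≤ u + c ∧ t < dist.length
        · rw [if_pos h2, if_pos (by omega)]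
        · rw [if_neg h2, if_neg (by omega)]
    | some d0 =>
      dsimp only
      by_cases hlt : du + |nums.getD (u + 1 + c) 0 - nums.getD u 0| < d0
      · rw [if_pos hlt, getD_set_any, hlen, ih t]
        by_cases ht : t = u + 1 + c ∧ t < dist.length
        · rw [if_pos ht, if_pos (by omega)]
          obtain ⟨ht1, ht2⟩ := ht
          subst ht1
          rw [hd0]
          simp only [dmerge]
          rw [if_pos hlt]
        · rw [if_neg ht]
          by_cases h2 : u + 1 ≤ t ∧ t ≤ u + c ∧ t < dist.length
          · rw [if_pos h2, if_pos (by omega)]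
          · rw [if_neg h2, if_neg (by omega)]
      · rw [if_neg hlt, ih t]
        by_cases h2 : u + 1 ≤ t ∧ t ≤ u + c ∧ t < dist.length
        · rw [if_pos h2, if_pos (by omega)]
        · rw [if_neg h2]
          by_cases h3 : u + 1 ≤ t ∧ t ≤ u + (c + 1) ∧ t < dist.length
          · rw [if_pos h3]
            have ht : t = u + 1 + c := by omega
            subst ht
            rw [hd0]
            simp only [dmerge]
            rw [if_neg hlt]
          · rw [if_neg h3]

-- one Dijkstra round preserves the invariant
theorem step_inv (nums : List Int) (k n : Int) (N r : ℕ)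
    (hn : n = (N : Int)) (hN : 1 ≤ N) (hr : r < N)
    (dist : List (Option Int)) (settled : List Bool)
    (hinv : DInv (fun t => nums.getD t 0) (max k 1).toNat N r dist settled) :
    DInv (fun t => nums.getD t 0) (max k 1).toNat N (r + 1)
      (dijkstraStep nums n (max k 1) (dist, settled)).1
      (dijkstraStep nums n (max k 1) (dist, settled)).2 := by
  obtain ⟨hdlen, hslen, hcount, hI1, hI2⟩ := hinv
  have hKmax : (1 : Int) ≤ max k 1 := le_max_right k 1
  have hK1 : 1 ≤ (max k 1).toNat := by omega
  have hKcast : (((max k 1).toNat : ℕ) : Int) = max k 1 := by omega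
  -- some unsettled vertex has a finite tentative distance (the least unsettled one does)
  have H : ∃ v, v < N ∧ settled.getD v false = false ∧ dist.getD v none ≠ none := by
    obtain ⟨v0, hv0, hsv0⟩ := exists_unsettled settled r hcount (by omega)
    have hP : ∃ v, v < N ∧ settled.getD v false = false := ⟨v0, by omega, hsv0⟩
    have hmP := Nat.find_spec hP
    by_cases hm0 : Nat.find hP = 0
    · refine ⟨Nat.find hP, hmP.1, hmP.2, ?_⟩
      rw [hm0] at hmP ⊢
      rw [(hI2 0 hmP.1 hmP.2).1 rfl]
      simp
    · have hm1N : Nat.find hP - 1 < N := by have := hmP.1; omega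
      have hm1s : settled.getD (Nat.find hP - 1) false = true := by
        have hmin := Nat.find_min hP (show Nat.find hP - 1 < Nat.find hP by omega)
        by_contra hc
        exact hmin ⟨hm1N, by revert hc; cases settled.getD (Nat.find hP - 1) false <;> simp⟩
      refine ⟨Nat.find hP, hmP.1, hmP.2, ?_⟩
      intro hnone
      have hwin : Nat.find hP - 1 ∈ win (max k 1).toNat (Nat.find hP) :=
        mem_win_iff.mpr ⟨by omega, by omega⟩
      have := ((hI2 (Nat.find hP) hmP.1 hmP.2).2 hm0).1 hnone (Nat.find hP - 1) hwin
      rw [hm1s] at this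
      cases this
  obtain ⟨u, hures, huN, husett, du, hdu, humin⟩ := argminScan_spec dist settled n N hn H
  have hinv' : DInv (fun t => nums.getD t 0) (max k 1).toNat N r dist settled :=
    ⟨hdlen, hslen, hcount, hI1, hI2⟩
  -- the settled vertex carries its exact shortest distance
  have hduδ : du = dRef (fun t => nums.getD t 0) (max k 1).toNat u := by
    have hge := dist_ge (fun t => nums.getD t 0) (max k 1).toNat N r dist settled hinv' u huN husett du hdu
    rcases lt_or_eq_of_le hge with hlt | heq
    · exfalso
      obtain ⟨y, hy, hyu, e, he, hle⟩ :=
        lemL (fun t => nums.getD t 0) (max k 1).toNat N r dist settled hK1 hinv' u huN husett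
      have := humin y hy hyu e he
      omega
    · omega
  -- the relaxation range is u+1 .. u+c with c = min(u+K, N-1) - u
  have hbound : min ((u : Int) + max k 1) (n - 1) + 1
      = (u : Int) + 1 + ((min (u + (max k 1).toNat) (N - 1) - u : ℕ) : Int) := by
    rw [hn, ← hKcast]
    omega
  have hwineq : ∀ t : ℕ, t < N →
      (u + 1 ≤ t ∧ t ≤ u + (min (u + (max k 1).toNat) (N - 1) - u)
        ↔ u ∈ win (max k 1).toNat t) := by
    intro t ht
    rw [mem_win_iff]
    omega
  simp only [dijkstraStep, hures, hbound, PySem.List.pySetD_natCast]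
  have hrelax := relax_fold nums u du dist hdu (min (u + (max k 1).toNat) (N - 1) - u)
  have hrlen := relax_fold_length nums u dist (min (u + (max k 1).toNat) (N - 1) - u)
  have hsget : ∀ j : ℕ, (settled.set u true).getD j false
      = if j = u ∧ j < settled.length then true else settled.getD j false :=
    fun j => getD_set_any settled u j true false
  unfold DInv
  refine ⟨?_, ?_, ?_, ?_, ?_⟩
  · rw [hrlen]
    exact hdlen
  · rw [List.length_set]
    exact hslen
  · rw [count_set_true settled u (by omega) husett, hcount]
  · -- settled vertices keep their exact distances
    intro s hs hset'
    rw [hrelax s]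
    by_cases hsu : s = u
    · subst hsu
      rw [if_neg (by omega), hdu, hduδ]
    · have hsettled_s : settled.getD s false = true := by
        rw [hsget s, if_neg (fun hh => hsu hh.1)] at hset'
        exact hset'
      have hds := hI1 s hs hsettled_s
      by_cases hin : u + 1 ≤ s ∧ s ≤ u + (min (u + (max k 1).toNat) (N - 1) - u) ∧ s < dist.length
      · rw [if_pos hin, hds]
        have humem : u ∈ win (max k 1).toNat s := (hwineq s hs).mp ⟨hin.1, hin.2.1⟩
        have hle := dRef_le (fun t => nums.getD t 0) (max k 1).toNat humem
        simp only [dmerge]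
        rw [if_neg (by simp only [] at hle ⊢; omega)]
      · rw [if_neg hin]
        exact hds
  · -- unsettled vertices: tentative distance = min over settled window predecessors
    intro v hv hsv'
    have hvu : v ≠ u := by
      intro he
      subst he
      rw [hsget v, if_pos ⟨rfl, by omega⟩] at hsv'
      cases hsv'
    have hsv : settled.getD v false = false := by
      rw [hsget v, if_neg (fun hh => hvu hh.1)] at hsv'
      exact hsv'
    refine ⟨?_, ?_⟩
    · intro hv0
      subst hv0
      rw [hrelax 0, if_neg (by omega)]
      exact (hI2 0 hv hsv).1 rfl
    · intro hv0
      by_cases hin : u + 1 ≤ v ∧ v ≤ u + (min (u + (max k 1).toNat) (N - 1) - u)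
      · -- v is relaxed this round: u joins its settled window predecessors
        have humem : u ∈ win (max k 1).toNat v := (hwineq v hv).mp hin
        have hsu' : (settled.set u true).getD u false = true := by
          rw [hsget u, if_pos ⟨rfl, by omega⟩]
        rw [hrelax v, if_pos ⟨hin.1, hin.2, by omega⟩]
        constructor
        · intro hnone
          exfalso
          cases hdv : dist.getD v none with
          | none =>
            rw [hdv] at hnone
            simp [dmerge] at hnone
          | some d1 =>
            rw [hdv] at hnone
            simp only [dmerge] at hnone
            split_ifs at hnone
        · intro d hd
          cases hdv : dist.getD v none with
          | none =>
            rw [hdv] at hd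
            simp only [dmerge] at hd
            injection hd with hd
            have hallun := ((hI2 v hv hsv).2 hv0).1 hdv
            constructor
            · intro j hj hsj'
              by_cases hju : j = u
              · subst hju
                simp only []
                omega
              · rw [hsget j, if_neg (fun hh => hju hh.1)] at hsj'
                rw [hallun j hj] at hsj'
                cases hsj'
            · exact ⟨u, humem, hsu', by simp only []; omega⟩
          | some d1 =>
            obtain ⟨hbOld, jw, hjw, hjws, hjwe⟩ := ((hI2 v hv hsv).2 hv0).2 d1 hdv
            rw [hdv] at hd
            simp only [dmerge] at hd
            by_cases hlt : du + |nums.getD v 0 - nums.getD u 0| < d1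
            · rw [if_pos hlt] at hd
              injection hd with hd
              constructor
              · intro j hj hsj'
                by_cases hju : j = u
                · subst hju
                  simp only []
                  omega
                · rw [hsget j, if_neg (fun hh => hju hh.1)] at hsj'
                  have := hbOld j hj hsj'
                  simp only [] at this ⊢
                  omega
              · exact ⟨u, humem, hsu', by simp only []; omega⟩
            · rw [if_neg hlt] at hd
              injection hd with hd
              constructor
              · intro j hj hsj'
                by_cases hju : j = u
                · subst hju
                  simp only []
                  omega
                · rw [hsget j, if_neg (fun hh => hju hh.1)] at hsj'
                  exact hd ▸ hbOld j hj hsj'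
              · refine ⟨jw, hjw, ?_, hd ▸ hjwe⟩
                have hju : jw ≠ u := by
                  intro he
                  rw [he, husett] at hjws
                  cases hjws
                rw [hsget jw, if_neg (fun hh => hju hh.1)]
                exact hjws
      · -- v untouched this round and u is not one of its window predecessors
        have hnwin : u ∉ win (max k 1).toNat v := fun hmem => hin ((hwineq v hv).mpr hmem)
        rw [hrelax v, if_neg (by omega)]
        constructor
        · intro hnone j hj
          have hju : j ≠ u := fun he => hnwin (he ▸ hj)
          rw [hsget j, if_neg (fun hh => hju hh.1)]
          exact ((hI2 v hv hsv).2 hv0).1 hnone j hj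
        · intro d hd
          obtain ⟨hbOld, jw, hjw, hjws, hjwe⟩ := ((hI2 v hv hsv).2 hv0).2 d hd
          constructor
          · intro j hj hsj'
            have hju : j ≠ u := fun he => hnwin (he ▸ hj)
            rw [hsget j, if_neg (fun hh => hju hh.1)] at hsj'
            exact hbOld j hj hsj'
          · refine ⟨jw, hjw, ?_, hjwe⟩
            have hju : jw ≠ u := fun he => hnwin (he ▸ hjw)
            rw [hsget jw, if_neg (fun hh => hju hh.1)]
            exact hjws

theorem outer_loop (nums : List Int) (k n : Int) (N : ℕ)
    (hn : n = (N : Int)) (hN : 1 ≤ N) (m : ℕ) (hm : m ≤ N) :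
    DInv (fun t => nums.getD t 0) (max k 1).toNat N m
      ((PySem.List.pyRange 0 ((m : ℕ) : Int) 1).foldl
        (fun st _ => dijkstraStep nums n (max k 1) st)
        (PySem.List.pySetD (List.replicate N none) 0 (some 0),
         List.replicate N false)).1
      ((PySem.List.pyRange 0 ((m : ℕ) : Int) 1).foldl
        (fun st _ => dijkstraStep nums n (max k 1) st)
        (PySem.List.pySetD (List.replicate N none) 0 (some 0),
         List.replicate N false)).2 := by
  induction m with
  | zero =>
    rw [show ((0 : ℕ) : Int) = (0 : Int) from rfl, PySem.List.pyRange_one_eq_nil le_rfl]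
    simp only [List.foldl_nil]
    have hset : PySem.List.pySetD (List.replicate N (none : Option Int)) 0 (some 0)
        = (List.replicate N (none : Option Int)).set 0 (some 0) :=
      PySem.List.pySetD_of_nonneg _ _ le_rfl
    unfold DInv
    refine ⟨?_, ?_, ?_, ?_, ?_⟩
    · rw [hset]
      simp
    · simp
    · simp [List.count_replicate]
    · intro s hs habs
      rw [List.getD_eq_getElem _ _ (by simpa using hs)] at habs
      simp at habs
    · intro v hv hunset
      refine ⟨?_, ?_⟩
      · intro hv0
        subst hv0
        rw [hset, getD_set_any, if_pos ⟨rfl, by simpa using hN⟩]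
      · intro hv0
        refine ⟨?_, ?_⟩
        · intro _ j hj
          rcases Nat.lt_or_ge j N with h | h
          · rw [List.getD_eq_getElem _ _ (by simpa using h)]
            simp
          · rw [List.getD_eq_default _ _ (by simpa using h)]
        · intro d hd
          exfalso
          rw [hset, getD_set_any, if_neg (fun hh => hv0 hh.1)] at hd
          rcases Nat.lt_or_ge v N with h | h
          · rw [List.getD_eq_getElem _ _ (by simpa using h)] at hd
            simp at hd
          · rw [List.getD_eq_default _ _ (by simpa using h)] at hd
            cases hd
  | succ m ih =>
    have hsplit : PySem.List.pyRange 0 ((m + 1 : ℕ) : Int) 1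
        = PySem.List.pyRange 0 ((m : ℕ) : Int) 1 ++ [((m : ℕ) : Int)] := by
      have h2 : ((m + 1 : ℕ) : Int) = ((m : ℕ) : Int) + 1 := by push_cast; ring
      rw [h2, PySem.List.pyRange_one_succ_right (Int.natCast_nonneg m)]
    rw [hsplit, List.foldl_append]
    simp only [List.foldl_cons, List.foldl_nil]
    have hstep := step_inv nums k n N m hn hN (by omega)
      ((PySem.List.pyRange 0 ((m : ℕ) : Int) 1).foldl
        (fun st _ => dijkstraStep nums n (max k 1) st)
        (PySem.List.pySetD (List.replicate N none) 0 (some 0),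
         List.replicate N false)).1
      ((PySem.List.pyRange 0 ((m : ℕ) : Int) 1).foldl
        (fun st _ => dijkstraStep nums n (max k 1) st)
        (PySem.List.pySetD (List.replicate N none) 0 (some 0),
         List.replicate N false)).2
      (ih (by omega))
    rw [Prod.mk.eta] at hstep
    exact hstep

theorem solve_alt_eq_dRef (n : Int) (nums : List Int) (k : Int) (hn : 1 ≤ n) :
    solve_alt n nums k = dRef (fun t => nums.getD t 0) (max k 1).toNat (n.toNat - 1) := by
  have hnN : n = ((n.toNat : ℕ) : Int) := by omega
  obtain ⟨hdlen, hslen, hcount, hI1, hI2⟩ :=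
    outer_loop nums k n n.toNat hnN (by omega) n.toNat le_rfl
  simp only [solve_alt]
  rw [show PySem.List.pyRange 0 n 1 = PySem.List.pyRange 0 ((n.toNat : ℕ) : Int) 1 from by
    rw [← hnN]]
  have hall := all_settled _ (by rw [hcount, hslen])
  rw [hslen] at hall
  have hs := hall (n.toNat - 1) (by omega)
  have hdval := hI1 (n.toNat - 1) (by omega) hs
  rw [show n - 1 = ((n.toNat - 1 : ℕ) : Int) by omega,
    PySem.List.pyGetD_natCast, hdval]
  rfl

-- ===== VERDICT (by name: the statement is the Claim_ definition above) =====
theorem solve_spec : Claim_equal_solve := by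
  intro n nums k hdom hpre
  unfold Pre_solve at hpre
  unfold Spec_solve
  rw [solve_eq_dRef n nums k hpre.1, solve_alt_eq_dRef n nums k hpre.1]
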